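-- pv_equiv track=rewrite | github.com/scsystem1/ChemBO-Agent | core/graph.py | _count_stagnation
-- ===== SOURCE A (Python) =====
-- from typing import Any, Literal
--
-- def _count_stagnation(perf_log: list[dict[str, Any]]) -> int:
--     if not perf_log:
--         return 0
--     count = 0
--     best = perf_log[-1].get("best_so_far")
--     for entry in reversed(perf_log):
--         if entry.get("best_so_far") == best:
--             count += 1
--         else:
--             break
--     return count
-- ===== SOURCE B (Python) =====
-- def _count_stagnation(perf_log: list) -> int:
--     if not perf_log:
--         return 0
--     best = perf_log[-1].get("best_so_far")
--     flags = [entry.get("best_so_far") != best for entry in perf_log]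
--     flags.reverse()
--     try:
--         return flags.index(True)
--     except ValueError:
--         return len(flags)
-- ===== Notes on version B (the rewrite author's own statement) =====
-- stated objective: alternative
-- what changed: A walks the list in reverse with an early-break counter; B first materialises a boolean mismatch list (entry.get != final best), reverses it, and returns the position of the first True via list.index (or the length when none), so no counting loop remains.
import Mathlib
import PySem

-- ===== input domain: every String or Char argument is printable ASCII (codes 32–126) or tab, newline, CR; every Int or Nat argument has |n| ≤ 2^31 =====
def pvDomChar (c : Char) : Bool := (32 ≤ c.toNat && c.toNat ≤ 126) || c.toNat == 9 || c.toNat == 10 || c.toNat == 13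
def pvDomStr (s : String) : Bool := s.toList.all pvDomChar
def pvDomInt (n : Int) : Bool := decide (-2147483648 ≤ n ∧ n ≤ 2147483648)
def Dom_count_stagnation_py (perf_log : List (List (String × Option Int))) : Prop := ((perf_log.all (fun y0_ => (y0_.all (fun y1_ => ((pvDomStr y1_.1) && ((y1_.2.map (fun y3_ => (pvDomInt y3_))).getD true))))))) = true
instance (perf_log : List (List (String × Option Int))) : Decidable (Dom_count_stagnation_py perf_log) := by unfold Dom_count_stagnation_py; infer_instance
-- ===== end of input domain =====

-- B replaces A's reverse walk with early-break counter by building a reversed boolean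
-- mismatch list and returning the index of its first True (alternative decomposition, same cost).


-- ===== PORT A =====
-- entry.get("best_so_far"): first-match association-list lookup, None (= none) when absent
def pvGetBest (d : List (String × Option Int)) : Option Int :=
  ((d.find? (fun p => p.1 == "best_so_far")).map Prod.snd).getD none

-- the 'for entry in reversed(perf_log)' loop with its break
def pvALoop (best : Option Int) (count : Int) : List (List (String × Option Int)) → Int
  | [] => count
  | e :: rest => if pvGetBest e = best then pvALoop best (count + 1) rest else count

def count_stagnation_py (perf_log : List (List (String × Option Int))) : Int :=
  if perf_log = [] then 0
  else
    -- best = perf_log[-1].get("best_so_far")  (perf_log nonempty here)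
    pvALoop (pvGetBest ((PySem.List.pyGet? perf_log (-1)).getD [])) 0 perf_log.reverse

-- ===== PORT B =====
def count_stagnation_py_alt (perf_log : List (List (String × Option Int))) : Int :=
  if perf_log = [] then 0
  else
    let best := pvGetBest ((PySem.List.pyGet? perf_log (-1)).getD [])
    -- flags = [entry.get("best_so_far") != best for entry in perf_log]; flags.reverse()
    let flags := (perf_log.map (fun entry => decide (pvGetBest entry ≠ best))).reverse
    -- flags.index(True), or len(flags) on ValueError
    match PySem.List.index? flags true with
    | some i => (i : Int)
    | none => (flags.length : Int)

-- ===== PRECONDITION & SPEC =====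
def Spec_count_stagnation_py (perf_log : List (List (String × Option Int))) (out : Int) : Prop := out = count_stagnation_py_alt perf_log
instance (perf_log : List (List (String × Option Int))) (out : Int) : Decidable (Spec_count_stagnation_py perf_log out) := by unfold Spec_count_stagnation_py; infer_instance

-- ===== CLAIM (what is proved, stated in full; the proofs are below) =====
def Claim_equal_count_stagnation_py : Prop := ∀ (perf_log : List (List (String × Option Int))), Dom_count_stagnation_py perf_log → Spec_count_stagnation_py perf_log (count_stagnation_py perf_log)

-- ===== LEMMAS AND PROOFS =====

-- A's early-break counter equals the index of the first mismatch flag (length if none)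
theorem pvALoop_index (best : Option Int) (c : Int) (r : List (List (String × Option Int))) :
    pvALoop best c r =
      c + (match PySem.List.index? (r.map (fun e => decide (pvGetBest e ≠ best))) true with
           | some i => (i : Int)
           | none => (r.length : Int)) := by
  induction r generalizing c with
  | nil => simp [pvALoop, PySem.List.index?, List.idxOf?]
  | cons e rest ih =>
    by_cases h : pvGetBest e = best
    · have hf : decide (pvGetBest e ≠ best) = false := by simp [h]
      rw [List.map_cons, hf, PySem.List.index?_cons_of_ne _ (by simp : (false : Bool) ≠ true)]
      simp only [pvALoop, if_pos h, ih]
      cases hidx : PySem.List.index? (rest.map (fun e => decide (pvGetBest e ≠ best))) true with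
      | none => simp; ring
      | some i => simp; ring
    · have ht : decide (pvGetBest e ≠ best) = true := by simp [h]
      rw [List.map_cons, ht, PySem.List.index?_cons_self]
      simp [pvALoop, h]

-- ===== VERDICT (by name: the statement is the Claim_ definition above) =====
theorem count_stagnation_py_spec : Claim_equal_count_stagnation_py := by
  intro perf_log _
  show count_stagnation_py perf_log = count_stagnation_py_alt perf_log
  unfold count_stagnation_py count_stagnation_py_alt
  by_cases hne : perf_log = []
  · simp [hne]
  · rw [if_neg hne, if_neg hne]
    show pvALoop (pvGetBest ((PySem.List.pyGet? perf_log (-1)).getD [])) 0 perf_log.reverse =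
      match PySem.List.index?
          ((perf_log.map (fun entry =>
              decide (pvGetBest entry ≠ pvGetBest ((PySem.List.pyGet? perf_log (-1)).getD [])))).reverse) true with
      | some i => (i : Int)
      | none => (((perf_log.map (fun entry =>
              decide (pvGetBest entry ≠ pvGetBest ((PySem.List.pyGet? perf_log (-1)).getD [])))).reverse).length : Int)
    rw [← List.map_reverse, pvALoop_index]
    simp
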